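-- pv_equiv track=rewrite | github.com/dr-robert-li/multi-agent-learning | src/workflows/report_generation.py | _extract_discussion
-- ===== SOURCE A (Python) =====
-- from typing import Dict, Any, List, Optional
--
-- def _extract_discussion(agent_outputs: Dict[str, Any]) -> str:
--     """Extract discussion section"""
--     content_parts = []
--
--     if "SynthesisAgent" in agent_outputs:
--         synthesis = agent_outputs["SynthesisAgent"][0]
--
--         # Integrated findings
--         integrated_findings = synthesis.get("integrated_findings", [])
--         if integrated_findings:
--             content_parts.append("## Integrated Analysis\n\n" +
--                                "\n".join([f"- {finding}" for finding in integrated_findings]))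
--
--         # Theoretical contributions
--         theoretical = synthesis.get("theoretical_contributions", [])
--         if theoretical:
--             content_parts.append("## Theoretical Implications\n\n" +
--                                "\n".join([f"- {contrib}" for contrib in theoretical]))
--
--         # Practical implications
--         practical = synthesis.get("practical_implications", [])
--         if practical:
--             content_parts.append("## Practical Implications\n\n" +
--                                "\n".join([f"- {impl}" for impl in practical]))
--
--     # Quality assessment
--     if "PeerReviewAgent" in agent_outputs:
--         review = agent_outputs["PeerReviewAgent"][0]
--         strengths = review.get("strengths", [])
--         if strengths:
--             content_parts.append("## Research Strengths\n\n" +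
--                                "\n".join([f"- {strength}" for strength in strengths]))
--
--     return "\n\n".join(content_parts) if content_parts else "Discussion section to be completed."
-- ===== SOURCE B (Python) =====
-- def _extract_discussion(agent_outputs):
--     """Extract discussion section, built recursively back-to-front (no parts list)."""
--     def emit(specs):
--         # returns the finished markdown for `specs`, "" if no section applies
--         if not specs:
--             return ""
--         agent, field, heading = specs[0]
--         rest = emit(specs[1:])
--         items = agent_outputs[agent][0].get(field, []) if agent in agent_outputs else []
--         if not items:
--             return rest
--         section = heading + "\n\n- " + "\n- ".join(items)
--         return section + "\n\n" + rest if rest else section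
--     return emit([
--         ("SynthesisAgent", "integrated_findings", "## Integrated Analysis"),
--         ("SynthesisAgent", "theoretical_contributions", "## Theoretical Implications"),
--         ("SynthesisAgent", "practical_implications", "## Practical Implications"),
--         ("PeerReviewAgent", "strengths", "## Research Strengths"),
--     ]) or "Discussion section to be completed."
-- ===== Notes on version B (the rewrite author's own statement) =====
-- stated objective: alternative
-- what changed: Instead of accumulating a parts list in four straight-line blocks and joining it at the end, B builds the final string directly by recursion over a section spec, concatenating each section onto the already-built remainder (back-to-front, separator decided on the fly) and formatting bullets as '- ' + '\n- '.join(items).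
import Mathlib
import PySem

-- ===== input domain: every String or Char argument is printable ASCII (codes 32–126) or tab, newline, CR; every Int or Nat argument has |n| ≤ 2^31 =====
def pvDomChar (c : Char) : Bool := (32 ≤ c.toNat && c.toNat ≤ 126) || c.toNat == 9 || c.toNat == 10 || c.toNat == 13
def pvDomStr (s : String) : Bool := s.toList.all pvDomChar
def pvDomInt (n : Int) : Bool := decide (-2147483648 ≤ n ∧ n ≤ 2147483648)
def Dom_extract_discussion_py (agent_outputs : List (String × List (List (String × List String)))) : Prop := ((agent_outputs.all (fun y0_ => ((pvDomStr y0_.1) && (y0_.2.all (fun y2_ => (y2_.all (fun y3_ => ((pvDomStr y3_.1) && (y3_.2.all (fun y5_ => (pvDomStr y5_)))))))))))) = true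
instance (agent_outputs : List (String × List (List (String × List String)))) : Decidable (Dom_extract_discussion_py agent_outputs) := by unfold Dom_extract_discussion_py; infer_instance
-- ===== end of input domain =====

-- B builds the final string directly by recursion over a section spec (back-to-front,
-- separators decided on the fly) instead of A's four straight-line blocks + list join; same output.

-- ===== PORT A =====
-- dict lookup (first match) on an association list; none = key absent
def pvLookup? {α : Type} (d : List (String × α)) (k : String) : Option α :=
  (d.find? (fun p => p.1 == k)).map (·.2)

-- Python's inner_dict.get(field, [])
def pvFieldGetD (d : List (String × List String)) (k : String) : List String :=
  (pvLookup? d k).getD []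

-- "## Heading\n\n" ++ "\n".join("- " + x for x in items)
def pvSection (heading : String) (items : List String) : String :=
  heading ++ "\n\n" ++ PySem.Str.join "\n" (items.map (fun x => "- " ++ x))

def extract_discussion_py (agent_outputs : List (String × List (List (String × List String)))) : String :=
  let parts0 : List String :=
    match pvLookup? agent_outputs "SynthesisAgent" with
    | none => []
    | some lst =>
      match lst.head? with
      | none => []    -- Python raises IndexError here; excluded by Pre_
      | some synthesis =>
        let integrated := pvFieldGetD synthesis "integrated_findings"
        let p1 : List String :=
          if integrated.isEmpty then [] else [pvSection "## Integrated Analysis" integrated]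
        let theoretical := pvFieldGetD synthesis "theoretical_contributions"
        let p2 : List String :=
          if theoretical.isEmpty then p1 else p1 ++ [pvSection "## Theoretical Implications" theoretical]
        let practical := pvFieldGetD synthesis "practical_implications"
        if practical.isEmpty then p2 else p2 ++ [pvSection "## Practical Implications" practical]
  let parts : List String :=
    match pvLookup? agent_outputs "PeerReviewAgent" with
    | none => parts0
    | some lst =>
      match lst.head? with
      | none => parts0    -- Python raises IndexError here; excluded by Pre_
      | some review =>
        let strengths := pvFieldGetD review "strengths"
        if strengths.isEmpty then parts0 else parts0 ++ [pvSection "## Research Strengths" strengths]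
  if parts.isEmpty then "Discussion section to be completed." else PySem.Str.join "\n\n" parts

-- ===== PORT B =====
-- heading + "\n\n- " + "\n- ".join(items)
def pvSection2 (heading : String) (items : List String) : String :=
  heading ++ "\n\n- " ++ PySem.Str.join "\n- " items

-- items for one spec entry: agent_outputs[agent][0].get(field, []) if agent in agent_outputs else []
def pvItemsOf (agent_outputs : List (String × List (List (String × List String))))
    (e : String × String × String) : List String :=
  match pvLookup? agent_outputs e.1 with
  | none => []
  | some lst =>
    match lst.head? with
    | none => []    -- Python raises IndexError here; excluded by Pre_
    | some block => pvFieldGetD block e.2.1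

-- B's recursive emit: builds the finished markdown for the given specs, "" if none applies
def pvEmit (agent_outputs : List (String × List (List (String × List String)))) :
    List (String × String × String) → String
  | [] => ""
  | e :: specs =>
    let rest := pvEmit agent_outputs specs
    let items := pvItemsOf agent_outputs e
    if items.isEmpty then rest
    else
      let sec := pvSection2 e.2.2 items
      if rest == "" then sec else sec ++ "\n\n" ++ rest

def extract_discussion_py_alt (agent_outputs : List (String × List (List (String × List String)))) : String :=
  let out := pvEmit agent_outputs
    [("SynthesisAgent", "integrated_findings", "## Integrated Analysis"),
     ("SynthesisAgent", "theoretical_contributions", "## Theoretical Implications"),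
     ("SynthesisAgent", "practical_implications", "## Practical Implications"),
     ("PeerReviewAgent", "strengths", "## Research Strengths")]
  if out == "" then "Discussion section to be completed." else out

-- ===== PRECONDITION & SPEC =====
-- Pre_ excludes exactly the inputs on which Python A raises IndexError: a present
-- "SynthesisAgent" or "PeerReviewAgent" key whose (first-match) value is the empty list.
def Pre_extract_discussion_py (agent_outputs : List (String × List (List (String × List String)))) : Prop :=
  ((pvLookup? agent_outputs "SynthesisAgent").all (fun lst => !lst.isEmpty)) = true ∧
  ((pvLookup? agent_outputs "PeerReviewAgent").all (fun lst => !lst.isEmpty)) = true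
instance (agent_outputs : List (String × List (List (String × List String)))) : Decidable (Pre_extract_discussion_py agent_outputs) := by unfold Pre_extract_discussion_py; infer_instance

def pvWitness_extract_discussion_py : (List (String × List (List (String × List String)))) :=
  [("SynthesisAgent", [[("integrated_findings", ["finding one"])]])]

def Spec_extract_discussion_py (agent_outputs : List (String × List (List (String × List String)))) (out : String) : Prop := out = extract_discussion_py_alt agent_outputs
instance (agent_outputs : List (String × List (List (String × List String)))) (out : String) : Decidable (Spec_extract_discussion_py agent_outputs out) := by unfold Spec_extract_discussion_py; infer_instance

-- ===== CLAIM =====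
def Claim_equal_extract_discussion_py : Prop := ∀ (agent_outputs : List (String × List (List (String × List String)))), Dom_extract_discussion_py agent_outputs → Pre_extract_discussion_py agent_outputs → Spec_extract_discussion_py agent_outputs (extract_discussion_py agent_outputs)

-- ===== LEMMAS AND PROOFS =====

-- the contribution of one spec entry, in A's formatting
def pvPartOf (agent_outputs : List (String × List (List (String × List String))))
    (e : String × String × String) : List String :=
  match pvLookup? agent_outputs e.1 with
  | none => []
  | some lst =>
    match lst.head? with
    | none => []
    | some block =>
      let items := pvFieldGetD block e.2.1
      if items.isEmpty then [] else [pvSection e.2.2 items]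

-- "- " ++ "\n- ".join(items)  =  "\n".join("- " + x)  (any items, even [])
theorem pvBullets_eq (cs : List (List Char)) :
    ['-', ' '] ++ PySem.Chars.join ['\n', '-', ' '] cs
      = PySem.Chars.join ['\n'] (cs.map (fun c => ['-', ' '] ++ c)) ∨ cs = [] := by
  induction cs with
  | nil => right; rfl
  | cons p t ih =>
    left
    cases t with
    | nil => simp [PySem.Chars.join_singleton]
    | cons q r =>
      rcases ih with ih | ih
      · simp only [List.map_cons, PySem.Chars.join_cons_cons] at *
        rw [← ih]; simp
      · exact absurd ih (by simp)

theorem pvSection2_eq (h : String) (items : List String) (hne : items ≠ []) :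
    pvSection2 h items = pvSection h items := by
  apply String.toList_inj.mp
  unfold pvSection2 pvSection
  rcases pvBullets_eq (items.map String.toList) with heq | heq
  · have hmap : (List.map (fun x => "- " ++ x) items).map String.toList
        = (items.map String.toList).map (fun c => ['-', ' '] ++ c) := by
      simp only [List.map_map]
      congr 1
      funext x
      rw [Function.comp_apply, Function.comp_apply, String.toList_append]
      congr 1
    have h1 : ("\n\n- " : String).toList = ("\n\n" : String).toList ++ ['-', ' '] := by decide
    have h2 : ("\n- " : String).toList = ['\n', '-', ' '] := by decide
    have h3 : ("\n" : String).toList = ['\n'] := by decide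
    simp only [String.toList_append, PySem.Str.toList_join, hmap, h1, h2, h3, ← heq]
    simp [List.append_assoc]
  · simp at heq; exact absurd heq hne

theorem pvSection_toList_ne (h : String) (items : List String) (hh : h.toList ≠ []) :
    (pvSection h items).toList ≠ [] := by
  unfold pvSection
  simp only [String.toList_append]
  intro hc
  rw [List.append_assoc] at hc
  exact hh (List.append_eq_nil_iff.mp hc).1

theorem pvJoin_toList_ne (p : String) (ps : List String) (hp : p.toList ≠ []) :
    (PySem.Str.join "\n\n" (p :: ps)).toList ≠ [] := by
  rw [PySem.Str.toList_join]
  cases ps with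
  | nil => simpa [PySem.Chars.join_singleton] using hp
  | cons q r =>
    simp only [List.map_cons, PySem.Chars.join_cons_cons]
    intro hc
    exact hp (List.append_eq_nil_iff.mp (List.append_eq_nil_iff.mp hc).1).1

theorem pvStr_join_cons_cons (sep p q : String) (rest : List String) :
    PySem.Str.join sep (p :: q :: rest) = p ++ sep ++ PySem.Str.join sep (q :: rest) := by
  apply String.toList_inj.mp
  simp [PySem.Str.toList_join, PySem.Chars.join_cons_cons, String.toList_append]

theorem pvStr_join_singleton (sep p : String) : PySem.Str.join sep [p] = p := by
  apply String.toList_inj.mp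
  simp [PySem.Str.toList_join, PySem.Chars.join_singleton]

-- every A-part has a nonempty string, provided headings are nonempty
-- pvPartOf, re-expressed through pvItemsOf
theorem pvPartOf_eq (ao : List (String × List (List (String × List String))))
    (e : String × String × String) :
    pvPartOf ao e =
      (if (pvItemsOf ao e).isEmpty then [] else [pvSection e.2.2 (pvItemsOf ao e)]) := by
  unfold pvPartOf pvItemsOf
  cases hl : pvLookup? ao e.1 with
  | none => rfl
  | some lst =>
    cases hh : lst.head? with
    | none => simp [hh]
    | some block => simp [hh]

theorem pvPartOf_ne (ao : List (String × List (List (String × List String))))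
    (e : String × String × String) (hh : e.2.2.toList ≠ []) :
    ∀ p ∈ pvPartOf ao e, p.toList ≠ [] := by
  intro p hp
  rw [pvPartOf_eq] at hp
  split at hp
  · simp at hp
  · simp at hp; subst hp; exact pvSection_toList_ne _ _ hh

-- B's recursion computes A's "join the collected parts"
theorem pvEmit_eq (ao : List (String × List (List (String × List String))))
    (specs : List (String × String × String))
    (H : ∀ e ∈ specs, (e.2.2 : String).toList ≠ []) :
    pvEmit ao specs =
      (if (specs.flatMap (pvPartOf ao)).isEmpty then ""
       else PySem.Str.join "\n\n" (specs.flatMap (pvPartOf ao))) := by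
  induction specs with
  | nil => simp [pvEmit]
  | cons e t ih =>
    have He : (e.2.2 : String).toList ≠ [] := H e (by simp)
    have Ht : ∀ e' ∈ t, (e'.2.2 : String).toList ≠ [] := fun e' h => H e' (by simp [h])
    simp only [pvEmit, List.flatMap_cons, pvPartOf_eq, ih Ht]
    by_cases hi : (pvItemsOf ao e).isEmpty
    · have hnil : pvItemsOf ao e = [] := by simpa using hi
      rw [hnil]
      simp
    · have hine : pvItemsOf ao e ≠ [] := by simpa using hi
      rw [if_neg hi, if_neg hi, pvSection2_eq _ _ hine]
      by_cases ht : (t.flatMap (pvPartOf ao)).isEmpty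
      · have hnil : t.flatMap (pvPartOf ao) = [] := by simpa using ht
        simp [hnil, pvStr_join_singleton]
      · have hne : t.flatMap (pvPartOf ao) ≠ [] := by simpa using ht
        obtain ⟨q, qs, hq⟩ := List.exists_cons_of_ne_nil hne
        have hq0 : q.toList ≠ [] := by
          have hqmem : q ∈ t.flatMap (pvPartOf ao) := by rw [hq]; simp
          obtain ⟨e', he', hqp⟩ := List.mem_flatMap.mp hqmem
          exact pvPartOf_ne ao e' (Ht e' he') q hqp
        have hjne : (PySem.Str.join "\n\n" (t.flatMap (pvPartOf ao))) ≠ "" := by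
          rw [hq]
          intro hc
          exact pvJoin_toList_ne q qs hq0 (by rw [hc]; rfl)
        rw [if_neg ht, if_neg (by simpa using hjne)]
        rw [hq]
        simp only [List.cons_append, List.nil_append, List.isEmpty_cons]
        rw [if_neg (by simp), pvStr_join_cons_cons]

theorem pvA_eq_flatMap (agent_outputs : List (String × List (List (String × List String)))) :
    extract_discussion_py agent_outputs =
      (let parts := [("SynthesisAgent", "integrated_findings", "## Integrated Analysis"),
        ("SynthesisAgent", "theoretical_contributions", "## Theoretical Implications"),
        ("SynthesisAgent", "practical_implications", "## Practical Implications"),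
        ("PeerReviewAgent", "strengths", "## Research Strengths")].flatMap (pvPartOf agent_outputs)
       if parts.isEmpty then "Discussion section to be completed."
       else PySem.Str.join "\n\n" parts) := by
  unfold extract_discussion_py
  simp only [List.flatMap_cons, List.flatMap_nil, List.append_nil]
  cases hS : pvLookup? agent_outputs "SynthesisAgent" with
  | none =>
    cases hP : pvLookup? agent_outputs "PeerReviewAgent" with
    | none => simp [pvPartOf, hS, hP]
    | some lst2 =>
      cases h2 : lst2.head? with
      | none => simp [pvPartOf, hS, hP, h2]
      | some review => simp only [pvPartOf, hS, hP, h2]; split_ifs <;> simp_all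
  | some lst =>
    cases h1 : lst.head? with
    | none =>
      cases hP : pvLookup? agent_outputs "PeerReviewAgent" with
      | none => simp [pvPartOf, hS, hP, h1]
      | some lst2 =>
        cases h2 : lst2.head? with
        | none => simp [pvPartOf, hS, hP, h1, h2]
        | some review => simp only [pvPartOf, hS, hP, h1, h2]; split_ifs <;> simp_all
    | some synthesis =>
      cases hP : pvLookup? agent_outputs "PeerReviewAgent" with
      | none => simp only [pvPartOf, hS, hP, h1]; split_ifs <;> simp_all
      | some lst2 =>
        cases h2 : lst2.head? with
        | none => simp only [pvPartOf, hS, hP, h1, h2]; split_ifs <;> simp_all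
        | some review => simp only [pvPartOf, hS, hP, h1, h2]; split_ifs <;> simp_all

-- final wrap-up: the two "empty -> fallback" wrappers agree when every part is nonempty
theorem pvWrap_eq (parts : List String) (hp : ∀ p ∈ parts, p.toList ≠ []) :
    (if parts.isEmpty then "Discussion section to be completed." else PySem.Str.join "\n\n" parts)
      = (if (if parts.isEmpty then "" else PySem.Str.join "\n\n" parts) == ""
         then "Discussion section to be completed."
         else (if parts.isEmpty then "" else PySem.Str.join "\n\n" parts)) := by
  cases parts with
  | nil => rfl
  | cons q qs =>
    have hq0 : q.toList ≠ [] := hp q (by simp)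
    have hjne : PySem.Str.join "\n\n" (q :: qs) ≠ "" := by
      intro hc; exact pvJoin_toList_ne q qs hq0 (by rw [hc]; rfl)
    simp [hjne]

-- ===== VERDICT =====
theorem extract_discussion_py_spec : Claim_equal_extract_discussion_py := by
  intro ao _ _
  unfold Spec_extract_discussion_py extract_discussion_py_alt
  rw [pvA_eq_flatMap, pvEmit_eq ao _ (by decide)]
  refine pvWrap_eq _ ?_
  intro p hp
  obtain ⟨e', he', hqp⟩ := List.mem_flatMap.mp hp
  refine pvPartOf_ne ao e' ?_ p hqp
  fin_cases he' <;> decide
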